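-- pv_equiv track=rewrite | github.com/kamalbhatia6766/braintrim1 | scr1-10.py | _scr4_advanced_pattern_mining
-- ===== SOURCE A (Python) =====
-- from collections import Counter, defaultdict
--
-- def _scr4_advanced_pattern_mining(numbers, top_k):
--     sequences = defaultdict(list)
--     for length in [2, 3, 4]:
--         for i in range(len(numbers) - length):
--             seq = tuple(numbers[i:i+length])
--             next_val = numbers[i+length]
--             sequences[seq].append(next_val)
--     predictions = []
--     for length in [4, 3, 2]:
--         if len(numbers) >= length:
--             recent_seq = tuple(numbers[-length:])
--             if recent_seq in sequences:
--                 next_vals = sequences[recent_seq]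
--                 counter = Counter(next_vals)
--                 predictions.extend([num for num, _ in counter.most_common(3)])
--     if not predictions:
--         freq = Counter(numbers[-20:])
--         predictions = [num for num, _ in freq.most_common(top_k)]
--     return predictions[:top_k]
-- ===== SOURCE B (Python) =====
-- from collections import Counter
--
-- def _scr4_advanced_pattern_mining(numbers, top_k):
--     predictions = []
--     n = len(numbers)
--     for length in [4, 3, 2]:
--         if n >= length:
--             recent = tuple(numbers[-length:])
--             next_vals = [numbers[i + length] for i in range(n - length)
--                          if tuple(numbers[i:i + length]) == recent]
--             if next_vals:
--                 predictions.extend(num for num, _ in Counter(next_vals).most_common(3))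
--     if not predictions:
--         predictions = [num for num, _ in Counter(numbers[-20:]).most_common(top_k)]
--     return predictions[:top_k]
-- ===== Notes on version B (the rewrite author's own statement) =====
-- stated objective: simpler
-- what changed: B drops A's global subsequence->successors dict (built over all windows of lengths 2,3,4) and instead, for each queried length, scans the list once collecting successors of the recent window directly; the nonempty-collection test replaces the dict membership test.
import Mathlib
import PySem

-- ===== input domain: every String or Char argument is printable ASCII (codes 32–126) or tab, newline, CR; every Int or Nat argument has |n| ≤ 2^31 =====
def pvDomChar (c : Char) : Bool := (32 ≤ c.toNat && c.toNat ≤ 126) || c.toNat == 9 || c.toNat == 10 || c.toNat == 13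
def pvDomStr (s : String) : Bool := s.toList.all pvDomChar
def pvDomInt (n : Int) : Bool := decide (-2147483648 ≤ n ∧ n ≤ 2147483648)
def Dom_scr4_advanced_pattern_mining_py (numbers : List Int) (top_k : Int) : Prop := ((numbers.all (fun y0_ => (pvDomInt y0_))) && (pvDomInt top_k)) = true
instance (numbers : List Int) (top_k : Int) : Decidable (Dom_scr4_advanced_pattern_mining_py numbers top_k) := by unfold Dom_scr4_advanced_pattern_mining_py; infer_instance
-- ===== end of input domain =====

-- B skips building the global subsequence→successors dict and instead scans the list once per
-- queried window length, collecting successors of the recent window directly (objective: simpler).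

-- Counter(xs).most_common(n) keys, shared by both ports (both Pythons call this library routine):
-- sorted by count descending (stable, Python's reverse rule), take n (n < 0 gives []).
def pvMostCommon (xs : List Int) (n : Int) : List Int :=
  ((PySem.List.sorted (PySem.Dict.counter xs).items (fun p => p.2) true).take n.toNat).map (fun p => p.1)

-- ===== PORT A =====
def scr4_advanced_pattern_mining_py (numbers : List Int) (top_k : Int) : List Int :=
  let sequences : PySem.Dict (List Int) (List Int) :=
    [(2 : Int), 3, 4].foldl (fun d length =>
      (PySem.List.pyRange 0 ((numbers.length : Int) - length) 1).foldl (fun d i =>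
        d.modify (PySem.List.slice numbers (some i) (some (i + length))) []
          (fun vs => vs ++ [PySem.List.pyGetD numbers (i + length) 0])) d)
      PySem.Dict.empty
  let predictions : List Int :=
    [(4 : Int), 3, 2].foldl (fun preds length =>
      if length ≤ (numbers.length : Int) then
        let recent := PySem.List.slice numbers (some (-length)) none
        if sequences.contains recent then
          preds ++ pvMostCommon (sequences.getD recent []) 3
        else preds
      else preds) []
  let predictions :=
    if predictions = [] then
      pvMostCommon (PySem.List.slice numbers (some (-20)) none) top_k
    else predictions
  PySem.List.slice predictions none (some top_k)

-- ===== PORT B =====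
def scr4_advanced_pattern_mining_py_alt (numbers : List Int) (top_k : Int) : List Int :=
  let predictions : List Int :=
    [(4 : Int), 3, 2].foldl (fun preds length =>
      if length ≤ (numbers.length : Int) then
        let recent := PySem.List.slice numbers (some (-length)) none
        let nextVals :=
          (PySem.List.pyRange 0 ((numbers.length : Int) - length) 1).foldl (fun acc i =>
            if PySem.List.slice numbers (some i) (some (i + length)) == recent then
              acc ++ [PySem.List.pyGetD numbers (i + length) 0]
            else acc) []
        if nextVals ≠ [] then preds ++ pvMostCommon nextVals 3 else preds
      else preds) []
  let predictions :=
    if predictions = [] then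
      pvMostCommon (PySem.List.slice numbers (some (-20)) none) top_k
    else predictions
  PySem.List.slice predictions none (some top_k)

-- ===== PRECONDITION & SPEC =====
def Spec_scr4_advanced_pattern_mining_py (numbers : List Int) (top_k : Int) (out : List Int) : Prop := out = scr4_advanced_pattern_mining_py_alt numbers top_k
instance (numbers : List Int) (top_k : Int) (out : List Int) : Decidable (Spec_scr4_advanced_pattern_mining_py numbers top_k out) := by unfold Spec_scr4_advanced_pattern_mining_py; infer_instance

-- ===== CLAIM (what is proved, stated in full; the proofs are below) =====
def Claim_equal_scr4_advanced_pattern_mining_py : Prop := ∀ (numbers : List Int) (top_k : Int), Dom_scr4_advanced_pattern_mining_py numbers top_k → Spec_scr4_advanced_pattern_mining_py numbers top_k (scr4_advanced_pattern_mining_py numbers top_k)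

-- ===== LEMMAS AND PROOFS =====

def pvColl (numbers : List Int) (L : Int) (c : List Int) : List Int :=
  ((PySem.List.pyRange 0 ((numbers.length : Int) - L) 1).filter
    (fun i => PySem.List.slice numbers (some i) (some (i + L)) == c)).map
    (fun i => PySem.List.pyGetD numbers (i + L) 0)

def pvPass (numbers : List Int) (L : Int) (d : PySem.Dict (List Int) (List Int)) :
    PySem.Dict (List Int) (List Int) :=
  (PySem.List.pyRange 0 ((numbers.length : Int) - L) 1).foldl (fun d i =>
    d.modify (PySem.List.slice numbers (some i) (some (i + L))) []
      (fun vs => vs ++ [PySem.List.pyGetD numbers (i + L) 0])) d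

lemma pvKey_length (numbers : List Int) (L i : Int) (hL : 0 ≤ L)
    (hi : i ∈ PySem.List.pyRange 0 ((numbers.length : Int) - L) 1) :
    (PySem.List.slice numbers (some i) (some (i + L))).length = L.toNat := by
  rw [PySem.List.mem_pyRange_one] at hi
  obtain ⟨h0, h1⟩ := hi
  have hb : i + L = (((i + L).toNat : Nat) : Int) := by omega
  have ha : i = ((i.toNat : Nat) : Int) := by omega
  rw [hb, ha, PySem.List.slice_natCast]
  simp only [List.length_take, List.length_drop]
  omega

lemma pvPass_getD (numbers : List Int) (L : Int) (d : PySem.Dict (List Int) (List Int))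
    (c : List Int) :
    (pvPass numbers L d).getD c [] = d.getD c [] ++ pvColl numbers L c := by
  unfold pvPass pvColl
  have key : (PySem.List.pyRange 0 ((numbers.length : Int) - L) 1).foldl (fun d i =>
      d.modify (PySem.List.slice numbers (some i) (some (i + L))) []
        (fun vs => vs ++ [PySem.List.pyGetD numbers (i + L) 0])) d
      = ((PySem.List.pyRange 0 ((numbers.length : Int) - L) 1).map
          (fun i => (PySem.List.slice numbers (some i) (some (i + L)),
                     PySem.List.pyGetD numbers (i + L) 0))).foldl
          (fun d p => d.modify p.1 [] (fun vs => vs ++ [p.2])) d := by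
    rw [List.foldl_map]
  rw [key, PySem.Dict.getD_foldl_modify_append, List.filter_map]
  simp [Function.comp_def]

lemma pvColl_nil_of_length_ne (numbers : List Int) (L : Int) (c : List Int) (hL : 0 ≤ L)
    (h : c.length ≠ L.toNat) : pvColl numbers L c = [] := by
  unfold pvColl
  rw [List.map_eq_nil_iff, List.filter_eq_nil_iff]
  intro i hi
  simp only [beq_iff_eq]
  intro hceq
  exact h (by rw [← hceq]; exact pvKey_length numbers L i hL hi)

lemma pvPass_mem_keys (numbers : List Int) (L : Int) (d : PySem.Dict (List Int) (List Int))
    (c : List Int) :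
    c ∈ (pvPass numbers L d).keys ↔ c ∈ d.keys ∨ pvColl numbers L c ≠ [] := by
  unfold pvPass
  rw [PySem.Dict.keys_foldl_modify_key _
    (fun i => PySem.List.slice numbers (some i) (some (i + L))) []
    (fun _ i => fun vs => vs ++ [PySem.List.pyGetD numbers (i + L) 0]) d,
    PySem.Set.mem_update]
  apply or_congr Iff.rfl
  unfold pvColl
  simp [List.mem_map, List.map_eq_nil_iff, List.filter_eq_nil_iff, beq_iff_eq]
  tauto

def pvDictFull (numbers : List Int) : PySem.Dict (List Int) (List Int) :=
  pvPass numbers 4 (pvPass numbers 3 (pvPass numbers 2 PySem.Dict.empty))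

lemma pvFull_getD (numbers : List Int) (L : Int) (hL : L = 2 ∨ L = 3 ∨ L = 4)
    (c : List Int) (hc : c.length = L.toNat) :
    (pvDictFull numbers).getD c [] = pvColl numbers L c := by
  unfold pvDictFull
  rw [pvPass_getD, pvPass_getD, pvPass_getD, PySem.Dict.getD_empty]
  rcases hL with h | h | h <;> subst h
  · rw [pvColl_nil_of_length_ne numbers 3 c (by norm_num) (by simp_all),
        pvColl_nil_of_length_ne numbers 4 c (by norm_num) (by simp_all)]
    simp
  · rw [pvColl_nil_of_length_ne numbers 2 c (by norm_num) (by simp_all),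
        pvColl_nil_of_length_ne numbers 4 c (by norm_num) (by simp_all)]
    simp
  · rw [pvColl_nil_of_length_ne numbers 2 c (by norm_num) (by simp_all),
        pvColl_nil_of_length_ne numbers 3 c (by norm_num) (by simp_all)]
    simp

lemma pvFull_contains (numbers : List Int) (L : Int) (hL : L = 2 ∨ L = 3 ∨ L = 4)
    (c : List Int) (hc : c.length = L.toNat) :
    (pvDictFull numbers).contains c = true ↔ pvColl numbers L c ≠ [] := by
  unfold pvDictFull
  rw [PySem.Dict.contains_iff_mem_keys, pvPass_mem_keys, pvPass_mem_keys, pvPass_mem_keys,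
      PySem.Dict.keys_empty]
  rcases hL with h | h | h <;> subst h
  · rw [pvColl_nil_of_length_ne numbers 3 c (by norm_num) (by simp_all),
        pvColl_nil_of_length_ne numbers 4 c (by norm_num) (by simp_all)]
    simp
  · rw [pvColl_nil_of_length_ne numbers 2 c (by norm_num) (by simp_all),
        pvColl_nil_of_length_ne numbers 4 c (by norm_num) (by simp_all)]
    simp
  · rw [pvColl_nil_of_length_ne numbers 2 c (by norm_num) (by simp_all),
        pvColl_nil_of_length_ne numbers 3 c (by norm_num) (by simp_all)]
    simp

lemma pvCollFold (numbers : List Int) (L : Int) (c : List Int) :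
    (PySem.List.pyRange 0 ((numbers.length : Int) - L) 1).foldl (fun acc i =>
      if PySem.List.slice numbers (some i) (some (i + L)) == c then
        acc ++ [PySem.List.pyGetD numbers (i + L) 0]
      else acc) [] = pvColl numbers L c := by
  rw [PySem.List.foldl_append_if
    (fun i => PySem.List.slice numbers (some i) (some (i + L)) == c)
    (fun i => PySem.List.pyGetD numbers (i + L) 0)]
  simp [pvColl]

lemma pvStep (numbers : List Int) (L : Int) (hL : L = 2 ∨ L = 3 ∨ L = 4) (preds : List Int) :
    (if L ≤ (numbers.length : Int) then
      if (pvDictFull numbers).contains (PySem.List.slice numbers (some (-L)) none) then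
        preds ++ pvMostCommon
          ((pvDictFull numbers).getD (PySem.List.slice numbers (some (-L)) none) []) 3
      else preds
    else preds)
    =
    (if L ≤ (numbers.length : Int) then
      if ((PySem.List.pyRange 0 ((numbers.length : Int) - L) 1).foldl (fun acc i =>
            if PySem.List.slice numbers (some i) (some (i + L)) ==
                PySem.List.slice numbers (some (-L)) none then
              acc ++ [PySem.List.pyGetD numbers (i + L) 0]
            else acc) []) ≠ [] then
        preds ++ pvMostCommon
          ((PySem.List.pyRange 0 ((numbers.length : Int) - L) 1).foldl (fun acc i =>
            if PySem.List.slice numbers (some i) (some (i + L)) ==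
                PySem.List.slice numbers (some (-L)) none then
              acc ++ [PySem.List.pyGetD numbers (i + L) 0]
            else acc) []) 3
      else preds
    else preds) := by
  by_cases hn : L ≤ (numbers.length : Int)
  · rw [if_pos hn, if_pos hn, pvCollFold]
    have hlen : (PySem.List.slice numbers (some (-L)) none).length = L.toNat := by
      rcases hL with h | h | h <;> subst h <;>
        rw [PySem.List.slice_from_neg_ofNat numbers _ (by norm_num)] <;>
        simp only [List.length_drop] <;> omega
    rw [pvFull_getD numbers L hL _ hlen]
    by_cases hc : pvColl numbers L (PySem.List.slice numbers (some (-L)) none) = []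
    · have hcon : ¬ (pvDictFull numbers).contains (PySem.List.slice numbers (some (-L)) none) = true := by
        rw [pvFull_contains numbers L hL _ hlen]; simp [hc]
      simp [hcon, hc]
    · have hcon : (pvDictFull numbers).contains (PySem.List.slice numbers (some (-L)) none) = true :=
        (pvFull_contains numbers L hL _ hlen).mpr hc
      simp [hcon, hc]
  · simp [hn]

-- ===== VERDICT (by name: the statement is the Claim_ definition above) =====
theorem scr4_advanced_pattern_mining_py_spec : Claim_equal_scr4_advanced_pattern_mining_py := by
  intro numbers top_k _
  have h : ([(4 : Int), 3, 2].foldl (fun preds length =>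
      if length ≤ (numbers.length : Int) then
        if (pvDictFull numbers).contains (PySem.List.slice numbers (some (-length)) none) then
          preds ++ pvMostCommon
            ((pvDictFull numbers).getD (PySem.List.slice numbers (some (-length)) none) []) 3
        else preds
      else preds) ([] : List Int))
      = ([(4 : Int), 3, 2].foldl (fun preds length =>
      if length ≤ (numbers.length : Int) then
        if ((PySem.List.pyRange 0 ((numbers.length : Int) - length) 1).foldl (fun acc i =>
              if PySem.List.slice numbers (some i) (some (i + length)) ==
                  PySem.List.slice numbers (some (-length)) none then
                acc ++ [PySem.List.pyGetD numbers (i + length) 0]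
              else acc) []) ≠ [] then
          preds ++ pvMostCommon
            ((PySem.List.pyRange 0 ((numbers.length : Int) - length) 1).foldl (fun acc i =>
              if PySem.List.slice numbers (some i) (some (i + length)) ==
                  PySem.List.slice numbers (some (-length)) none then
                acc ++ [PySem.List.pyGetD numbers (i + length) 0]
              else acc) []) 3
        else preds
      else preds) ([] : List Int)) := by
    simp only [List.foldl]
    rw [pvStep numbers 4 (by norm_num), pvStep numbers 3 (by norm_num),
        pvStep numbers 2 (by norm_num)]
  exact congrArg (fun p : List Int => PySem.List.slice
    (if p = [] then pvMostCommon (PySem.List.slice numbers (some (-20)) none) top_k else p)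
    none (some top_k)) h
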